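-- pv_equiv track=rewrite | github.com/tanghaibao/jcvi | jcvi/compara/synteny.py | get_best_pair
-- ===== SOURCE A (Python) =====
-- def get_best_pair(qs, ss, ts):
--     pairs = {}
--     for q, s, t in zip(qs, ss, ts):
--         t = int(t[:-1]) if t[-1] == "L" else int(t)
--         if q not in pairs or pairs[q][1] < t:
--             pairs[q] = (s, t)
--
--     # Discard score
--     spairs = dict((q, s) for q, (s, t) in pairs.items())
--     return spairs
-- ===== SOURCE B (Python) =====
-- def get_best_pair(qs, ss, ts):
--     # Two-pass: group all (subject, score) per query, then pick the max-score
--     # subject per group (max() keeps the first maximum, like A's strict-improve scan).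
--     groups = {}
--     for q, s, t in zip(qs, ss, ts):
--         t = int(t[:-1]) if t[-1] == "L" else int(t)
--         groups.setdefault(q, []).append((s, t))
--     return {q: max(g, key=lambda st: st[1])[0] for q, g in groups.items()}
-- ===== Notes on version B (the rewrite author's own statement) =====
-- stated objective: alternative
-- what changed: A's single running-max scan that keeps one best (subject,score) per query is replaced by a two-pass shape: first build a dict grouping every parsed (subject,score) per query in encounter order, then reduce each group with max(key=score), which like A keeps the first maximum.
import Mathlib
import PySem

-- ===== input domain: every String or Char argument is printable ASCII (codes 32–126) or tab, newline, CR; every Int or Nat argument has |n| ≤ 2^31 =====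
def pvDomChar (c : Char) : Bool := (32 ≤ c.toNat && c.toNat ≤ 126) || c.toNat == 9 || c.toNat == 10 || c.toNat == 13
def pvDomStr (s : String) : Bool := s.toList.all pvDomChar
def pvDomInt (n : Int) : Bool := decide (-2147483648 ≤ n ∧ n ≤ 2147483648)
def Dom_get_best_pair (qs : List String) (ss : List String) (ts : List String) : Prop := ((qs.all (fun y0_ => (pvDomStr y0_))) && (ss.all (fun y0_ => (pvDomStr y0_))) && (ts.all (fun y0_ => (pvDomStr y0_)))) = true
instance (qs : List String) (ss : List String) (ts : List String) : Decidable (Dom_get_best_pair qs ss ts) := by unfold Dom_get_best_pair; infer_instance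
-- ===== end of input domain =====

-- B replaces A's single running-max scan by a group-then-reduce two-pass shape (objective: alternative, same cost).

-- t = int(t[:-1]) if t[-1] == "L" else int(t)   (shared one-line parse expression of both Pythons;
-- none exactly where Python raises: empty t (IndexError) or unparsable int (ValueError))
def pvParse? (t : String) : Option Int :=
  match PySem.Str.pyGet? t (-1) with
  | none => none
  | some c => if c = 'L' then PySem.Int.ofChars? (PySem.List.slice t.toList none (some (-1))) else PySem.Int.ofStr? t

-- ===== PORT A =====
-- loop body of A: if q not in pairs or pairs[q][1] < t: pairs[q] = (s, t)
def pvStepA (d : PySem.Dict String (String × Int)) (p : (String × String) × String) : PySem.Dict String (String × Int) :=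
  match d.get? p.1.1 with
  | none => d.insert p.1.1 (p.1.2, (pvParse? p.2).getD 0)
  | some m => if m.2 < (pvParse? p.2).getD 0 then d.insert p.1.1 (p.1.2, (pvParse? p.2).getD 0) else d

def get_best_pair (qs : List String) (ss : List String) (ts : List String) : List (String × String) :=
  let pairs := ((qs.zip ss).zip ts).foldl pvStepA PySem.Dict.empty
  let spairs := PySem.Dict.ofList (pairs.items.map (fun qp => (qp.1, qp.2.1)))
  spairs.items

-- ===== PORT B =====
-- loop body of B: groups.setdefault(q, []).append((s, t))
def pvStepB (d : PySem.Dict String (List (String × Int))) (p : (String × String) × String) : PySem.Dict String (List (String × Int)) :=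
  d.modify p.1.1 [] (fun g => g ++ [(p.1.2, (pvParse? p.2).getD 0)])

def get_best_pair_alt (qs : List String) (ss : List String) (ts : List String) : List (String × String) :=
  let groups := ((qs.zip ss).zip ts).foldl pvStepB PySem.Dict.empty
  let res := PySem.Dict.ofList (groups.items.map (fun qg =>
    (qg.1, match PySem.List.max? qg.2 (fun st => st.2) with
           | some st => st.1
           | none => "")))
  res.items

-- ===== PRECONDITION & SPEC =====
-- closed-form shape of a Python int literal: digits, single underscores between digits
def pvRest (l : List Char) : Bool :=
  match l with
  | [] => true
  | c :: rest =>
    if c.isDigit then pvRest rest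
    else if c == '_' then
      match rest with
      | d :: rest' => d.isDigit && pvRest rest'
      | [] => false
    else false

def pvDigitsTok (ds : List Char) : Bool :=
  match ds with
  | [] => false
  | d :: rest => d.isDigit && pvRest rest

-- what int() accepts: optional blank padding, optional sign, a digit token
def pvIntLike (cs : List Char) : Bool :=
  match ((cs.dropWhile PySem.Int.isIntSpace).reverse.dropWhile PySem.Int.isIntSpace).reverse with
  | '-' :: ds => pvDigitsTok ds
  | '+' :: ds => pvDigitsTok ds
  | ds => pvDigitsTok ds

-- a usable score string: nonempty, and an int literal after dropping one trailing 'L'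
def pvScoreOk (t : String) : Bool :=
  match t.toList.getLast? with
  | none => false
  | some c => pvIntLike (if c == 'L' then t.toList.dropLast else t.toList)

-- Pre_ excludes exactly the inputs where Python A raises: some consumed t is empty (IndexError on t[-1])
-- or, after dropping a trailing 'L', is not an int literal (ValueError from int()).
def Pre_get_best_pair (qs : List String) (ss : List String) (ts : List String) : Prop :=
  ∀ p ∈ (qs.zip ss).zip ts, pvScoreOk p.2 = true
instance (qs : List String) (ss : List String) (ts : List String) : Decidable (Pre_get_best_pair qs ss ts) := by unfold Pre_get_best_pair; infer_instance

def pvWitness_get_best_pair : List String × List String × List String :=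
  (["a", "b", "a"], ["x", "y", "z"], ["3", "10L", " 7 "])

def Spec_get_best_pair (qs : List String) (ss : List String) (ts : List String) (out : List (String × String)) : Prop := out = get_best_pair_alt qs ss ts
instance (qs : List String) (ss : List String) (ts : List String) (out : List (String × String)) : Decidable (Spec_get_best_pair qs ss ts out) := by unfold Spec_get_best_pair; infer_instance

-- ===== CLAIM (what is proved, stated in full; the proofs are below) =====
def Claim_equal_get_best_pair : Prop := ∀ (qs : List String) (ss : List String) (ts : List String), Dom_get_best_pair qs ss ts → Pre_get_best_pair qs ss ts → Spec_get_best_pair qs ss ts (get_best_pair qs ss ts)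

-- ===== LEMMAS AND PROOFS =====

-- a dict built from pairs with distinct keys has exactly those pairs as items
theorem pv_items_ofList {ν : Type} (l : List (String × ν)) (h : (l.map Prod.fst).Nodup) :
    (PySem.Dict.ofList l).items = l := by
  unfold PySem.Dict.ofList PySem.Dict.update
  have := PySem.Dict.items_foldl_insert_fresh l Prod.fst Prod.snd PySem.Dict.empty
    (fun a _ => PySem.Dict.contains_empty a.1) h
  simpa using this

-- first-maximum of a group extended by one element = A's strict-improvement step
theorem pv_max?_append_singleton {α : Type} (g : List (α × Int)) (x : α × Int) :
    PySem.List.max? (g ++ [x]) (fun st => st.2) =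
      (match PySem.List.max? g (fun st => st.2) with
       | none => some x
       | some m => if m.2 < x.2 then some x else some m) := by
  cases h : PySem.List.max? g (fun st => st.2) with
  | none =>
    unfold PySem.List.max? at h ⊢
    rw [List.foldl_append, h]
    simp [List.foldl]
  | some m =>
    unfold PySem.List.max? at h ⊢
    rw [List.foldl_append, h]
    simp [List.foldl]

theorem pv_stepB_eq (d : PySem.Dict String (List (String × Int))) (p : (String × String) × String) :
    pvStepB d p = d.insert p.1.1 ((d.getD p.1.1 []) ++ [(p.1.2, (pvParse? p.2).getD 0)]) := rfl

theorem pv_stepA_keys_of_contains (d : PySem.Dict String (String × Int))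
    (p : (String × String) × String) (hc : d.contains p.1.1 = true) :
    (pvStepA d p).keys = d.keys := by
  unfold pvStepA
  cases hg : d.get? p.1.1 with
  | none => simp [(PySem.Dict.get?_eq_none_iff_contains d _).1 hg] at hc
  | some m =>
    dsimp only
    split_ifs with hlt
    · exact PySem.Dict.keys_insert_of_contains d _ hc
    · rfl

theorem pv_stepA_keys_of_not_contains (d : PySem.Dict String (String × Int))
    (p : (String × String) × String) (hc : d.contains p.1.1 = false) :
    (pvStepA d p).keys = d.keys ++ [p.1.1] := by
  unfold pvStepA
  rw [(PySem.Dict.get?_eq_none_iff_contains d _).2 hc]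
  exact PySem.Dict.keys_insert_of_not_contains d _ hc

theorem pv_stepA_get?_self (d : PySem.Dict String (String × Int)) (p : (String × String) × String) :
    (pvStepA d p).get? p.1.1 =
      (match d.get? p.1.1 with
       | none => some (p.1.2, (pvParse? p.2).getD 0)
       | some m => if m.2 < (pvParse? p.2).getD 0 then some (p.1.2, (pvParse? p.2).getD 0) else some m) := by
  unfold pvStepA
  cases hg : d.get? p.1.1 with
  | none => simp [PySem.Dict.get?_insert_self]
  | some m =>
    by_cases hlt : m.2 < (pvParse? p.2).getD 0
    · simp [hlt, PySem.Dict.get?_insert_self]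
    · simp [hlt, hg]

theorem pv_stepA_get?_ne (d : PySem.Dict String (String × Int)) (p : (String × String) × String)
    (k : String) (hk : k ≠ p.1.1) : (pvStepA d p).get? k = d.get? k := by
  unfold pvStepA
  cases hg : d.get? p.1.1 with
  | none => exact PySem.Dict.get?_insert_of_ne d _ hk
  | some m =>
    dsimp only
    split_ifs with hlt
    · exact PySem.Dict.get?_insert_of_ne d _ hk
    · rfl

-- loop invariant: A's dict and B's group dict have the same keys (nodup) and
-- A's entry at k is the first maximum of B's group at k
theorem pv_invariant (l : List ((String × String) × String))
    (dA : PySem.Dict String (String × Int)) (dB : PySem.Dict String (List (String × Int)))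
    (hkeys : dA.keys = dB.keys) (hnd : dA.keys.Nodup)
    (hval : ∀ k, dA.get? k = PySem.List.max? (dB.getD k []) (fun st => st.2)) :
    (l.foldl pvStepA dA).keys = (l.foldl pvStepB dB).keys ∧
    (l.foldl pvStepA dA).keys.Nodup ∧
    ∀ k, (l.foldl pvStepA dA).get? k =
      PySem.List.max? ((l.foldl pvStepB dB).getD k []) (fun st => st.2) := by
  induction l generalizing dA dB with
  | nil => exact ⟨hkeys, hnd, hval⟩
  | cons p rest ih =>
    simp only [List.foldl_cons]
    have hcont : dA.contains p.1.1 = dB.contains p.1.1 := by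
      by_cases hq : p.1.1 ∈ dA.keys
      · rw [(PySem.Dict.contains_iff_mem_keys dA _).2 hq,
          (PySem.Dict.contains_iff_mem_keys dB _).2 (hkeys ▸ hq)]
      · have h1 : dA.contains p.1.1 = false := by
          cases h : dA.contains p.1.1
          · rfl
          · exact absurd ((PySem.Dict.contains_iff_mem_keys dA _).1 h) hq
        have h2 : dB.contains p.1.1 = false := by
          cases h : dB.contains p.1.1
          · rfl
          · exact absurd (hkeys ▸ (PySem.Dict.contains_iff_mem_keys dB _).1 h) hq
        rw [h1, h2]
    have hkeysB : (pvStepB dB p).keys =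
        (if dB.contains p.1.1 = true then dB.keys else dB.keys ++ [p.1.1]) := by
      rw [pv_stepB_eq]
      by_cases hc : dB.contains p.1.1 = true
      · simp [hc, PySem.Dict.keys_insert_of_contains dB _ hc]
      · have hc' : dB.contains p.1.1 = false := by
          cases h : dB.contains p.1.1
          · rfl
          · exact absurd h hc
        simp [hc', PySem.Dict.keys_insert_of_not_contains dB _ hc']
    have hkeysA : (pvStepA dA p).keys =
        (if dA.contains p.1.1 = true then dA.keys else dA.keys ++ [p.1.1]) := by
      by_cases hc : dA.contains p.1.1 = true
      · simp [hc, pv_stepA_keys_of_contains dA p hc]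
      · have hc' : dA.contains p.1.1 = false := by
          cases h : dA.contains p.1.1
          · rfl
          · exact absurd h hc
        simp [hc', pv_stepA_keys_of_not_contains dA p hc']
    have hkeys' : (pvStepA dA p).keys = (pvStepB dB p).keys := by
      rw [hkeysA, hkeysB, hcont, hkeys]
    have hnd' : (pvStepA dA p).keys.Nodup := by
      rw [hkeysA]
      by_cases hc : dA.contains p.1.1 = true
      · simpa [hc] using hnd
      · have hc' : dA.contains p.1.1 = false := by
          cases h : dA.contains p.1.1
          · rfl
          · exact absurd h hc
        have hq : p.1.1 ∉ dA.keys := fun hm => by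
          rw [(PySem.Dict.contains_iff_mem_keys dA _).2 hm] at hc'; cases hc'
        simp only [hc', Bool.false_eq_true, if_false, List.nodup_append]
        exact ⟨hnd, List.nodup_singleton _, by simpa using fun a ha (h : a = p.1.1) => hq (h ▸ ha)⟩
    have hval' : ∀ k, (pvStepA dA p).get? k =
        PySem.List.max? ((pvStepB dB p).getD k []) (fun st => st.2) := by
      intro k
      by_cases hk : k = p.1.1
      · rw [hk, pv_stepA_get?_self, pv_stepB_eq, PySem.Dict.getD_insert_self,
          pv_max?_append_singleton, ← hval p.1.1]
        cases hg : dA.get? p.1.1 <;> simp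
      · rw [pv_stepA_get?_ne dA p k hk, hval k, pv_stepB_eq,
          PySem.Dict.getD_insert_of_ne dB _ _ hk]
    exact ih _ _ hkeys' hnd' hval'

-- ===== VERDICT (by name: the statement is the Claim_ definition above) =====
theorem get_best_pair_spec : Claim_equal_get_best_pair := by
  intro qs ss ts _hdom _hpre
  unfold Spec_get_best_pair get_best_pair get_best_pair_alt
  obtain ⟨hkeys, hnd, hval⟩ := pv_invariant ((qs.zip ss).zip ts)
    PySem.Dict.empty PySem.Dict.empty rfl (by simp [PySem.Dict.keys_empty])
    (fun k => by simp [PySem.Dict.get?_empty, PySem.Dict.getD_empty, PySem.List.max?])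
  set dA := ((qs.zip ss).zip ts).foldl pvStepA PySem.Dict.empty with hdA
  set dB := ((qs.zip ss).zip ts).foldl pvStepB PySem.Dict.empty with hdB
  have hndB : dB.keys.Nodup := hkeys ▸ hnd
  rw [pv_items_ofList _ (by simpa [PySem.Dict.keys, List.map_map, Function.comp] using hnd),
      pv_items_ofList _ (by simpa [PySem.Dict.keys, List.map_map, Function.comp] using hndB)]
  rw [PySem.Dict.items_eq_map_keys dA hnd ("", 0),
      PySem.Dict.items_eq_map_keys dB hndB [], hkeys]
  rw [List.map_map, List.map_map]
  apply List.map_congr_left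
  intro k hk
  have hkm : k ∈ dA.keys := by rw [hkeys]; exact hk
  have hkA : dA.get? k ≠ none :=
    fun h => ((PySem.Dict.get?_eq_none_iff_not_mem_keys dA k).1 h) hkm
  cases hg : dA.get? k with
  | none => exact absurd hg hkA
  | some m =>
    have hv := hval k
    rw [hg] at hv
    simp only [Function.comp]
    rw [PySem.Dict.getD_eq_get?_getD dA k ("", 0), hg, ← hv]
    rfl
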